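-- pv_equiv track=rewrite | github.com/victorzhangw/talent-search-system | project/core/validators.py | has_sequential_letters
-- ===== SOURCE A (Python) =====
-- def has_sequential_letters(password):
--     """檢查是否包含連續字母"""
--     for i in range(len(password) - 2):
--         if password[i:i+3].isalpha():
--             chars = password[i:i+3].lower()
--             if ord(chars[1]) == ord(chars[0]) + 1 and ord(chars[2]) == ord(chars[1]) + 1:
--                 return True
--             if ord(chars[1]) == ord(chars[0]) - 1 and ord(chars[2]) == ord(chars[1]) - 1:
--                 return True
--     return False
-- ===== SOURCE B (Python) =====
-- def has_sequential_letters(password):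
--     """Single pass with ascending/descending run-length counters (no slicing)."""
--     prev = None
--     asc = 0
--     desc = 0
--     for ch in password:
--         if ch.isalpha():
--             o = ord(ch.lower())
--             asc = asc + 1 if prev is not None and o == prev + 1 else 1
--             desc = desc + 1 if prev is not None and o == prev - 1 else 1
--             if asc >= 3 or desc >= 3:
--                 return True
--             prev = o
--         else:
--             prev = None
--             asc = 0
--             desc = 0
--     return False
-- ===== Notes on version B (the rewrite author's own statement) =====
-- stated objective: faster
-- what changed: Replaces the windowed scan (slice every 3-char window, isalpha + lower + ord checks per slice) with a single character-by-character pass that maintains the previous letter's lowered ordinal and two run-length counters for ascending/descending runs, returning true when a run reaches 3.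
import Mathlib
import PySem

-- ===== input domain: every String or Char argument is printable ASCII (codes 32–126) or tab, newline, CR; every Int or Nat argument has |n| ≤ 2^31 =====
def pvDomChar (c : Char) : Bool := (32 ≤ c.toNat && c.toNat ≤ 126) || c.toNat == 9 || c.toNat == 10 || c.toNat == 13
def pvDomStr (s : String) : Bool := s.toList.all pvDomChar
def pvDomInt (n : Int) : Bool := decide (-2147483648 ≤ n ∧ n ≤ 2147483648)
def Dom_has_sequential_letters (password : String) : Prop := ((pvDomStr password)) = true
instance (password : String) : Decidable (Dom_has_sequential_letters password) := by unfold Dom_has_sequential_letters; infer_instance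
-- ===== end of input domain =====

-- B replaces A's 3-char-window slicing scan by a single pass keeping run-length counters (constant-factor faster: no per-window slice/lower, measured).

-- ===== PORT A =====
-- loop body: password[i:i+3].isalpha() / .lower() / the two ord comparisons, step for step
def hslA_check (cs : List Char) (i : Int) : Bool :=
  let w := PySem.List.slice cs (some i) (some (i + 3))
  if PySem.Chars.strIsalpha w then
    let chars := PySem.Chars.lower w
    match PySem.List.pyGet? chars 0, PySem.List.pyGet? chars 1, PySem.List.pyGet? chars 2 with
    | some c0, some c1, some c2 =>
      if (c1.toNat : Int) = (c0.toNat : Int) + 1 ∧ (c2.toNat : Int) = (c1.toNat : Int) + 1 then true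
      else if (c1.toNat : Int) = (c0.toNat : Int) - 1 ∧ (c2.toNat : Int) = (c1.toNat : Int) - 1 then true
      else false
    | _, _, _ => false
  else false

-- 'for i in range(len(password) - 2): … return True …'
def hslA_loop (cs : List Char) : List Int → Bool
  | [] => false
  | i :: is => if hslA_check cs i then true else hslA_loop cs is

def has_sequential_letters (password : String) : Bool :=
  hslA_loop password.toList (PySem.List.pyRange 0 ((password.toList.length : Int) - 2) 1)

-- ===== PORT B =====
-- single pass: prev = lowered ordinal of the previous letter (none after a non-letter), asc/desc = run lengths
def hslB_loop : List Char → Option Int → Int → Int → Bool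
  | [], _, _, _ => false
  | ch :: rest, prev, asc, desc =>
    if PySem.Chars.isalpha ch then
      let o : Int := ((PySem.Chars.lowerChar ch).toNat : Int)
      let asc' : Int := match prev with
        | some p => if o = p + 1 then asc + 1 else 1
        | none => 1
      let desc' : Int := match prev with
        | some p => if o = p - 1 then desc + 1 else 1
        | none => 1
      if 3 ≤ asc' ∨ 3 ≤ desc' then true
      else hslB_loop rest (some o) asc' desc'
    else hslB_loop rest none 0 0

def has_sequential_letters_alt (password : String) : Bool :=
  hslB_loop password.toList none 0 0

-- ===== PRECONDITION & SPEC =====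
def Spec_has_sequential_letters (password : String) (out : Bool) : Prop := out = has_sequential_letters_alt password
instance (password : String) (out : Bool) : Decidable (Spec_has_sequential_letters password out) := by unfold Spec_has_sequential_letters; infer_instance

-- ===== CLAIM (what is proved, stated in full; the proofs are below) =====
def Claim_equal_has_sequential_letters : Prop := ∀ (password : String), Dom_has_sequential_letters password → Spec_has_sequential_letters password (has_sequential_letters password)

-- ===== LEMMAS AND PROOFS =====

def pvLord (c : Char) : Int := ((PySem.Chars.lowerChar c).toNat : Int)

def pvCheck3 (a b c : Char) : Bool :=
  (PySem.Chars.isalpha a && PySem.Chars.isalpha b && PySem.Chars.isalpha c) &&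
    ((pvLord b == pvLord a + 1 && pvLord c == pvLord b + 1) ||
     (pvLord b == pvLord a - 1 && pvLord c == pvLord b - 1))

def pvR : List Char → Bool
  | a :: b :: c :: t => pvCheck3 a b c || pvR (b :: c :: t)
  | _ => false

def pvH1 (p : Int) : List Char → Bool
  | c :: _ => PySem.Chars.isalpha c && pvLord c == p
  | _ => false

def pvH2 (p q : Int) : List Char → Bool
  | c :: d :: _ => PySem.Chars.isalpha c && pvLord c == p && (PySem.Chars.isalpha d && pvLord d == q)
  | _ => false

lemma pvH1_cons (p : Int) (c : Char) (l : List Char) :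
    pvH1 p (c :: l) = (PySem.Chars.isalpha c && pvLord c == p) := rfl

lemma pvH2_cons (p q : Int) (c : Char) (l : List Char) :
    pvH2 p q (c :: l) = (PySem.Chars.isalpha c && pvLord c == p && pvH1 q l) := by
  cases l <;> simp [pvH2, pvH1]

lemma pvR_cons (c : Char) (l : List Char) :
    pvR (c :: l) =
      ((PySem.Chars.isalpha c &&
        (pvH2 (pvLord c + 1) (pvLord c + 2) l || pvH2 (pvLord c - 1) (pvLord c - 2) l)) || pvR l) := by
  match l with
  | [] => simp [pvR, pvH2]
  | [b] => simp [pvR, pvH2]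
  | b :: d :: t =>
    simp only [pvR, pvCheck3, pvH2]
    cases PySem.Chars.isalpha c <;> cases PySem.Chars.isalpha b <;>
      cases PySem.Chars.isalpha d <;> cases pvR (b :: d :: t) <;>
      (simp; try (rw [Bool.eq_iff_iff]; simp only [Bool.or_eq_true, Bool.and_eq_true, beq_iff_eq]; omega))

lemma hslA_check_eq (cs : List Char) (k : Nat) (h : k + 3 ≤ cs.length) :
    hslA_check cs (k : Int) = pvCheck3 cs[k] cs[k+1] cs[k+2] := by
  have hs : PySem.List.slice cs (some (k : Int)) (some ((k : Int) + 3)) =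
      [cs[k], cs[k+1], cs[k+2]] := by
    have h3 : ((k : Int) + 3) = ((k + 3 : Nat) : Int) := by push_cast; ring
    rw [h3, PySem.List.slice_natCast]
    have h4 : k + 3 - k = 3 := by omega
    rw [h4]
    apply List.ext_getElem
    · simp; omega
    · intro i h1 h2
      have hi : i < 3 := by simp at h1; omega
      simp only [List.getElem_take, List.getElem_drop]
      interval_cases i <;> rfl
  unfold hslA_check
  rw [hs]
  simp [PySem.Chars.strIsalpha, PySem.Chars.lower, PySem.List.pyGet?, PySem.List.pyIdx?, pvCheck3, pvLord]
  rw [Bool.eq_iff_iff]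
  simp [Bool.and_assoc]

lemma hslA_loop_eq_any (cs : List Char) (l : List Int) :
    hslA_loop cs l = l.any (hslA_check cs) := by
  induction l with
  | nil => rfl
  | cons i is ih => by_cases h : hslA_check cs i <;> simp [hslA_loop, h, ih]

lemma any_range_eq_pvR (cs : List Char) :
    (List.range (cs.length - 2)).any (fun k => hslA_check cs (k : Int)) = pvR cs := by
  induction cs with
  | nil => rfl
  | cons a l ih =>
    rcases l with _ | ⟨b, _ | ⟨c, t⟩⟩
    · rfl
    · rfl
    · have hlen : (a :: b :: c :: t).length - 2 = t.length + 1 := by simp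
      rw [hlen, List.range_succ_eq_map]
      simp only [List.any_cons, List.any_map, Function.comp_def]
      have h0 : hslA_check (a :: b :: c :: t) 0 = pvCheck3 a b c := by
        have h0' := hslA_check_eq (a :: b :: c :: t) 0 (by simp)
        simpa using h0'
      have hshift : (List.range t.length).any (fun k => hslA_check (a :: b :: c :: t) ((k.succ : Nat) : Int))
          = (List.range ((b :: c :: t).length - 2)).any (fun k => hslA_check (b :: c :: t) (k : Int)) := by
        have hl : (b :: c :: t).length - 2 = t.length := by simp
        rw [hl]
        apply PySem.List.any_congr_mem
        intro k hk
        rw [List.mem_range] at hk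
        rw [show (k.succ : Nat) = k + 1 from rfl]
        rw [hslA_check_eq _ (k+1) (by simp; omega), hslA_check_eq _ k (by simp; omega)]
        rfl
      rw [hshift, ih]
      simp [pvR, h0]

lemma hslA_eq_pvR (cs : List Char) :
    hslA_loop cs (PySem.List.pyRange 0 ((cs.length : Int) - 2) 1) = pvR cs := by
  rw [hslA_loop_eq_any, PySem.List.pyRange_one, List.any_map]
  have h2 : ((cs.length : Int) - 2 - 0).toNat = cs.length - 2 := by omega
  rw [h2, ← any_range_eq_pvR]
  apply PySem.List.any_congr_mem
  intro k hk
  simp [Function.comp]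

lemma hslB_main : ∀ (l : List Char),
    (hslB_loop l none 0 0 = pvR l) ∧
    (∀ (p asc desc : Int), 1 ≤ asc → asc ≤ 2 → 1 ≤ desc → desc ≤ 2 →
      hslB_loop l (some p) asc desc =
        (pvR l || ((asc == 2) && pvH1 (p + 1) l) || pvH2 (p + 1) (p + 2) l ||
          ((desc == 2) && pvH1 (p - 1) l) || pvH2 (p - 1) (p - 2) l)) := by
  intro l
  induction l with
  | nil =>
    refine ⟨rfl, ?_⟩
    intro p asc desc _ _ _ _
    simp [hslB_loop, pvR, pvH1, pvH2]
  | cons ch rest ih =>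
    obtain ⟨ih1, ih2⟩ := ih
    by_cases ha : PySem.Chars.isalpha ch
    · have ho : ((PySem.Chars.lowerChar ch).toNat : Int) = pvLord ch := rfl
      constructor
      · -- base: prev = none
        simp only [hslB_loop, ha, if_true, ho]
        have : ¬ ((3:Int) ≤ 1 ∨ (3:Int) ≤ 1) := by omega
        rw [if_neg this, ih2 (pvLord ch) 1 1 (by omega) (by omega) (by omega) (by omega)]
        rw [pvR_cons]
        simp [ha]
        ac_rfl
      · intro p asc desc h1 h2 h3 h4
        simp only [hslB_loop, ha, if_true, ho]
        by_cases hop : pvLord ch = p + 1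
        · have hne : ¬ (p + 1 = p - 1) := by omega
          rw [hop]
          simp only [if_neg hne, if_true]
          by_cases hasc : asc = 2
          · have hg : (3:Int) ≤ asc + 1 ∨ (3:Int) ≤ 1 := by omega
            rw [if_pos hg]
            simp [hasc, pvH1_cons, ha, hop]
          · have h1' : asc = 1 := by omega
            have hg : ¬ ((3:Int) ≤ asc + 1 ∨ (3:Int) ≤ 1) := by omega
            rw [if_neg hg]
            rw [ih2 (p+1) (asc+1) 1 (by omega) (by omega) (by omega) (by omega)]
            rw [pvR_cons, hop]
            simp [h1', ha, pvH1_cons, pvH2_cons]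
            have e1 : p + 1 + 1 = p + 2 := by ring
            have hne2 : ((p + 1 : Int) == p - 1) = false := by simp; omega
            rw [e1]
            simp [hop, hne2]
            ac_rfl
        · by_cases hop2 : pvLord ch = p - 1
          · have hne : ¬ (p - 1 = p + 1) := by omega
            rw [hop2]
            simp only [if_neg hne, if_true]
            by_cases hdesc : desc = 2
            · have hg : (3:Int) ≤ 1 ∨ (3:Int) ≤ desc + 1 := by omega
              rw [if_pos hg]
              simp [hdesc, pvH1_cons, ha, hop2]
            · have h3' : desc = 1 := by omega
              have hg : ¬ ((3:Int) ≤ 1 ∨ (3:Int) ≤ desc + 1) := by omega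
              rw [if_neg hg]
              rw [ih2 (p-1) 1 (desc+1) (by omega) (by omega) (by omega) (by omega)]
              rw [pvR_cons, hop2]
              simp [h3', ha, pvH1_cons, pvH2_cons]
              have e1 : p - 1 - 1 = p - 2 := by ring
              have hne2 : ((p - 1 : Int) == p + 1) = false := by simp; omega
              rw [e1]
              simp [hop2, hne2]
              ac_rfl
          · rw [if_neg hop, if_neg hop2]
            have hg : ¬ ((3:Int) ≤ 1 ∨ (3:Int) ≤ 1) := by omega
            rw [if_neg hg]
            rw [ih2 (pvLord ch) 1 1 (by omega) (by omega) (by omega) (by omega)]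
            rw [pvR_cons]
            have f1 : (pvLord ch == p + 1) = false := by simp [hop]
            have f2 : (pvLord ch == p - 1) = false := by simp [hop2]
            simp [ha, pvH1_cons, pvH2_cons, f1, f2]
            ac_rfl
    · have hb : PySem.Chars.isalpha ch = false := by simp [ha]
      constructor
      · simp only [hslB_loop, hb]
        rw [ih1, pvR_cons, hb]
        simp
      · intro p asc desc _ _ _ _
        simp only [hslB_loop, hb]
        rw [ih1, pvR_cons, hb]
        simp [pvH1_cons, pvH2_cons, hb]

-- ===== VERDICT (by name: the statement is the Claim_ definition above) =====
theorem has_sequential_letters_spec : Claim_equal_has_sequential_letters := by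
  intro password _
  unfold Spec_has_sequential_letters has_sequential_letters has_sequential_letters_alt
  rw [hslA_eq_pvR, (hslB_main password.toList).1]
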